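-- pv_equiv track=rewrite | github.com/yesonsys03-web/VibeLign | vibelign/commands/vib_transfer_cmd.py | _looks_like_handoff_context_work
-- ===== SOURCE A (Python) =====
-- def _looks_like_handoff_context_work(paths: list[str]) -> bool:
--     joined = " ".join(paths)
--     return any(
--         marker in joined
--         for marker in (
--             "vib_transfer_cmd",
--             "transfer_git_context",
--             "mcp_transfer",
--             "test_vib_transfer_handoff",
--             "test_transfer_git_context",
--         )
--     )
-- ===== SOURCE B (Python) =====
-- def _has_handoff_marker(p: str) -> bool:
--     return ("vib_transfer_cmd" in p
--             or "transfer_git_context" in p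
--             or "mcp_transfer" in p
--             or "test_vib_transfer_handoff" in p
--             or "test_transfer_git_context" in p)
--
--
-- def _looks_like_handoff_context_work(paths: list[str]) -> bool:
--     for p in paths:
--         if _has_handoff_marker(p):
--             return True
--     return False
-- ===== Notes on version B (the rewrite author's own statement) =====
-- stated objective: simpler
-- what changed: B drops the join step and the marker-tuple iteration: it loops over the paths with an early return, testing each path with a helper that checks the five markers as a plain boolean or-chain; equivalent because no marker contains a space, so none can span A's join boundary.
import Mathlib
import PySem

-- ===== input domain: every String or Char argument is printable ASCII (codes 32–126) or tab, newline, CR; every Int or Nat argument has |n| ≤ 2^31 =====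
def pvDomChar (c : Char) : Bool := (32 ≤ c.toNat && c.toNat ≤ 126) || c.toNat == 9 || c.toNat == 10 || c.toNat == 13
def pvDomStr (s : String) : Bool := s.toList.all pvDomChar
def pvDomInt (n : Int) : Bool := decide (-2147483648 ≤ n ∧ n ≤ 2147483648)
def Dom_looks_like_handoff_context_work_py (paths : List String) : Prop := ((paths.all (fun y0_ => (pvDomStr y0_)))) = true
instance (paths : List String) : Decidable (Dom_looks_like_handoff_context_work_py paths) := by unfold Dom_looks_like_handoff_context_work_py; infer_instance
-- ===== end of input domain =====

-- B drops A's " ".join and marker-tuple loop: it recurses over the paths with an early return, checking the five markers as a plain or-chain per path (simpler; equivalent since no marker contains a space).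


-- ===== PORT A =====
-- A's fixed marker tuple, scanned by any(…) against the joined string
def pvMarkers : List String :=
  ["vib_transfer_cmd", "transfer_git_context", "mcp_transfer",
   "test_vib_transfer_handoff", "test_transfer_git_context"]

def looks_like_handoff_context_work_py (paths : List String) : Bool :=
  let joined := PySem.Str.join " " paths
  pvMarkers.any (fun marker => PySem.Str.isIn marker joined)

-- ===== PORT B =====
-- helper _has_handoff_marker: the five markers as a plain or-chain
def pvHasHandoffMarker (p : String) : Bool :=
  PySem.Str.isIn "vib_transfer_cmd" p
    || PySem.Str.isIn "transfer_git_context" p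
    || PySem.Str.isIn "mcp_transfer" p
    || PySem.Str.isIn "test_vib_transfer_handoff" p
    || PySem.Str.isIn "test_transfer_git_context" p

-- the for-loop with early return, as structural recursion over paths
def looks_like_handoff_context_work_py_alt : List String → Bool
  | [] => false
  | p :: rest =>
    if pvHasHandoffMarker p then true
    else looks_like_handoff_context_work_py_alt rest

-- ===== PRECONDITION & SPEC =====
def Spec_looks_like_handoff_context_work_py (paths : List String) (out : Bool) : Prop := out = looks_like_handoff_context_work_py_alt paths
instance (paths : List String) (out : Bool) : Decidable (Spec_looks_like_handoff_context_work_py paths out) := by unfold Spec_looks_like_handoff_context_work_py; infer_instance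

-- ===== CLAIM (what is proved, stated in full; the proofs are below) =====
def Claim_equal_looks_like_handoff_context_work_py : Prop := ∀ (paths : List String), Dom_looks_like_handoff_context_work_py paths → Spec_looks_like_handoff_context_work_py paths (looks_like_handoff_context_work_py paths)

-- ===== LEMMAS AND PROOFS =====

-- a list avoiding c that is a prefix of u ++ c :: v is a prefix of u
theorem prefix_of_prefix_append_cons {l u v : List Char} {c : Char}
    (hc : c ∉ l) (h : l <+: u ++ c :: v) : l <+: u := by
  induction u generalizing l with
  | nil =>
    cases l with
    | nil => exact List.nil_prefix
    | cons x xs =>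
      rcases h with ⟨t, ht⟩
      simp only [List.nil_append, List.cons_append, List.cons.injEq] at ht
      exact absurd (ht.1 ▸ List.mem_cons_self) hc
  | cons a u ih =>
    cases l with
    | nil => exact List.nil_prefix
    | cons x xs =>
      rcases h with ⟨t, ht⟩
      simp only [List.cons_append, List.cons.injEq] at ht
      obtain ⟨rfl, ht2⟩ := ht
      rcases ih (fun hx => hc (List.mem_cons_of_mem _ hx)) ⟨t, ht2⟩ with ⟨t', ht'⟩
      exact ⟨t', by simp [ht']⟩

-- a list avoiding c is an infix of u ++ c :: v iff it is an infix of u or of v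
theorem infix_append_cons_iff {l u v : List Char} {c : Char} (hc : c ∉ l) :
    l <:+: u ++ c :: v ↔ (l <:+: u ∨ l <:+: v) := by
  constructor
  · intro h
    induction u generalizing l with
    | nil =>
      simp only [List.nil_append, List.infix_cons_iff] at h
      rcases h with h | h
      · left
        have := prefix_of_prefix_append_cons (u := []) hc (by simpa using h)
        simpa using this.isInfix
      · exact Or.inr h
    | cons a u ih =>
      rw [List.cons_append, List.infix_cons_iff] at h
      rcases h with h | h
      · left
        exact (prefix_of_prefix_append_cons (u := a :: u) hc (by simpa using h)).isInfix
      · rcases ih hc h with h' | h'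
        · exact Or.inl (h'.trans ⟨[a], [], by simp⟩)
        · exact Or.inr h'
  · rintro (h | h)
    · exact h.trans ⟨[], c :: v, by simp⟩
    · exact h.trans ⟨u ++ [c], [], by simp⟩

-- the heart: a nonempty space-free marker occurs in " ".join(paths) iff it occurs in some path
theorem isIn_join_iff (m : List Char) (hm : m ≠ []) (hc : ' ' ∉ m) :
    ∀ ps : List (List Char),
      (PySem.Chars.isIn m (PySem.Chars.join [' '] ps) = true ↔
        ∃ p ∈ ps, PySem.Chars.isIn m p = true) := by
  intro ps
  induction ps with
  | nil =>
    simp only [PySem.Chars.join_nil, PySem.Chars.isIn_iff_infix, List.infix_nil,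
      List.not_mem_nil, false_and, exists_false, iff_false]
    exact hm
  | cons p ps ih =>
    cases ps with
    | nil => simp [PySem.Chars.join_singleton]
    | cons q rest =>
      rw [PySem.Chars.join_cons_cons, PySem.Chars.isIn_iff_infix]
      have hmid : p ++ [' '] ++ PySem.Chars.join [' '] (q :: rest)
          = p ++ ' ' :: PySem.Chars.join [' '] (q :: rest) := by simp
      rw [hmid, infix_append_cons_iff hc]
      simp only [← PySem.Chars.isIn_iff_infix]
      rw [ih]
      constructor
      · rintro (h | ⟨x, hx, h⟩)
        · exact ⟨p, by simp, h⟩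
        · exact ⟨x, List.mem_cons_of_mem _ hx, h⟩
      · rintro ⟨x, hx, h⟩
        rcases List.mem_cons.mp hx with rfl | hx
        · exact Or.inl h
        · exact Or.inr ⟨x, hx, h⟩

theorem isIn_join_str (m : String) (hm : m.toList ≠ []) (hc : ' ' ∉ m.toList)
    (paths : List String) :
    (PySem.Str.isIn m (PySem.Str.join " " paths) = true ↔
      ∃ p ∈ paths, PySem.Str.isIn m p = true) := by
  rw [PySem.Str.isIn_eq, PySem.Str.toList_join,
    show (" " : String).toList = [' '] from rfl, isIn_join_iff m.toList hm hc]
  constructor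
  · rintro ⟨pl, hpl, h⟩
    rcases List.mem_map.mp hpl with ⟨p, hp, rfl⟩
    exact ⟨p, hp, by rw [PySem.Str.isIn_eq]; exact h⟩
  · rintro ⟨p, hp, h⟩
    exact ⟨p.toList, List.mem_map_of_mem hp, by rw [← PySem.Str.isIn_eq]; exact h⟩

-- B's per-path or-chain is exactly "some marker of the tuple occurs in p"
theorem hasHandoffMarker_iff (p : String) :
    pvHasHandoffMarker p = true ↔ ∃ m ∈ pvMarkers, PySem.Str.isIn m p = true := by
  unfold pvHasHandoffMarker pvMarkers
  constructor
  · intro h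
    simp only [Bool.or_eq_true] at h
    rcases h with ((((h | h) | h) | h) | h) <;>
      exact ⟨_, by simp, h⟩
  · rintro ⟨m, hm, h⟩
    simp only [List.mem_cons, List.not_mem_nil, or_false] at hm
    simp only [Bool.or_eq_true]
    rcases hm with rfl | rfl | rfl | rfl | rfl
    · exact Or.inl (Or.inl (Or.inl (Or.inl h)))
    · exact Or.inl (Or.inl (Or.inl (Or.inr h)))
    · exact Or.inl (Or.inl (Or.inr h))
    · exact Or.inl (Or.inr h)
    · exact Or.inr h

-- B's early-return recursion is exactly "some path carries a marker"
theorem alt_iff (paths : List String) :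
    looks_like_handoff_context_work_py_alt paths = true ↔
      ∃ p ∈ paths, pvHasHandoffMarker p = true := by
  induction paths with
  | nil => simp [looks_like_handoff_context_work_py_alt]
  | cons p rest ih =>
    unfold looks_like_handoff_context_work_py_alt
    split_ifs with h
    · simp only [true_iff]
      exact ⟨p, by simp, h⟩
    · rw [ih]
      constructor
      · rintro ⟨x, hx, hx'⟩; exact ⟨x, List.mem_cons_of_mem _ hx, hx'⟩
      · rintro ⟨x, hx, hx'⟩
        rcases List.mem_cons.mp hx with rfl | hx
        · exact absurd hx' (by simpa using h)
        · exact ⟨x, hx, hx'⟩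

-- ===== VERDICT (by name: the statement is the Claim_ definition above) =====
theorem looks_like_handoff_context_work_py_spec : Claim_equal_looks_like_handoff_context_work_py := by
  intro paths _
  unfold Spec_looks_like_handoff_context_work_py
  unfold looks_like_handoff_context_work_py
  have hmk : ∀ m ∈ pvMarkers, m.toList ≠ [] ∧ ' ' ∉ m.toList := by decide
  rw [Bool.eq_iff_iff, alt_iff]
  simp only [List.any_eq_true]
  constructor
  · rintro ⟨m, hmem, h⟩
    rcases (isIn_join_str m (hmk m hmem).1 (hmk m hmem).2 paths).mp h with ⟨p, hp, h'⟩
    exact ⟨p, hp, (hasHandoffMarker_iff p).mpr ⟨m, hmem, h'⟩⟩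
  · rintro ⟨p, hp, hmark⟩
    rcases (hasHandoffMarker_iff p).mp hmark with ⟨m, hmem, h'⟩
    exact ⟨m, hmem, (isIn_join_str m (hmk m hmem).1 (hmk m hmem).2 paths).mpr ⟨p, hp, h'⟩⟩
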